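-- pv_equiv track=rewrite | github.com/clarissadesimoni/aoc15 | day5/day5.py | containsRepeatingCouple
-- ===== SOURCE A (Python) =====
-- def listOccurrences(string, substring):
--     count = []
--     if substring in string:
--         for i in range(len(string)):
--             if string[i:].startswith(substring):
--                 count.append(i)
--     return count
--
-- def containsRepeatingCouple(string):
--     found = False
--     for i in range(len(string) - 1):
--         occ = listOccurrences(string, string[i:i + 2])
--         occ = list(filter(lambda o: (o - 1) not in occ, occ))
--         found = len(occ) - 1 > 0
--         if (found):
--             break
--     return found
-- ===== SOURCE B (Python) =====
-- def containsRepeatingCouple(string):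
--     positions = {}
--     for i in range(len(string) - 1):
--         positions.setdefault(string[i:i + 2], []).append(i)
--     for ps in positions.values():
--         starts = [p for p in ps if p - 1 not in ps]
--         if len(starts) > 1:
--             return True
--     return False
-- ===== Notes on version B (the rewrite author's own statement) =====
-- stated objective: faster
-- what changed: Instead of re-scanning the whole string with listOccurrences for every index i (and re-filtering the same occurrence list each time), B makes one pass grouping the positions of each two-character pair into a dict and applies the overlap filter once per distinct pair.
import Mathlib
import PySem

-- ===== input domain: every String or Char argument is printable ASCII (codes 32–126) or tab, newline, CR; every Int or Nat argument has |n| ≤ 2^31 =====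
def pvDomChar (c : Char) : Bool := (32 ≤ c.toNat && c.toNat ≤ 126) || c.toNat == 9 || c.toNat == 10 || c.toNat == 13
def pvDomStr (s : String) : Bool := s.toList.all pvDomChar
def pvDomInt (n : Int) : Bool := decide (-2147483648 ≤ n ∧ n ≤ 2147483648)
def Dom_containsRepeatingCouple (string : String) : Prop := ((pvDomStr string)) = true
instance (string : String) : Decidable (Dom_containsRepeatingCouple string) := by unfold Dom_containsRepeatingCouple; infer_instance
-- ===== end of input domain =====

-- B replaces A's per-index rescan of the whole string (listOccurrences for every i) by ONE pass
-- that groups the positions of each two-character pair in a dict, then applies the same overlap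
-- filter once per distinct pair; objective: faster.

-- ===== PORT A =====
def listOccurrences (string substring : List Char) : List Int :=
  let count : List Int := []
  if PySem.Chars.isIn substring string then
    (PySem.List.pyRange 0 (string.length : Int) 1).foldl
      (fun count i =>
        if PySem.Chars.startswith (PySem.Chars.slice string (some i) none) substring
        then count ++ [i] else count) count
  else count

def crcLoop (string : List Char) : List Int → Bool
  | [] => false
  | i :: rest =>
    let occ := listOccurrences string (PySem.Chars.slice string (some i) (some (i + 2)))
    let occ2 := occ.filter (fun o => !(occ.contains (o - 1)))
    let found := decide (0 < (occ2.length : Int) - 1)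
    if found then found else crcLoop string rest

def containsRepeatingCouple (string : String) : Bool :=
  crcLoop string.toList (PySem.List.pyRange 0 ((string.toList.length : Int) - 1) 1)

-- ===== PORT B =====
def containsRepeatingCouple_alt (string : String) : Bool :=
  let cs := string.toList
  let positions := (PySem.List.pyRange 0 ((cs.length : Int) - 1) 1).foldl
    (fun d i => d.modify (PySem.Chars.slice cs (some i) (some (i + 2))) [] (fun ps => ps ++ [i]))
    PySem.Dict.empty
  positions.values.any (fun ps =>
    let starts := ps.filter (fun p => !(ps.contains (p - 1)))
    decide (1 < (starts.length : Int)))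

-- ===== PRECONDITION & SPEC =====
def Spec_containsRepeatingCouple (string : String) (out : Bool) : Prop := out = containsRepeatingCouple_alt string
instance (string : String) (out : Bool) : Decidable (Spec_containsRepeatingCouple string out) := by unfold Spec_containsRepeatingCouple; infer_instance

-- ===== CLAIM (what is proved, stated in full; the proofs are below) =====
def Claim_equal_containsRepeatingCouple : Prop := ∀ (string : String), Dom_containsRepeatingCouple string → Spec_containsRepeatingCouple string (containsRepeatingCouple string)

-- ===== LEMMAS AND PROOFS =====

-- the two-character slice starting at i
def pvPair (cs : List Char) (i : Int) : List Char := PySem.List.slice cs (some i) (some (i + 2))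

-- positions (in range(len-1)) whose pair equals k
def pvGroup (cs : List Char) (k : List Char) : List Int :=
  (PySem.List.pyRange 0 ((cs.length : Int) - 1) 1).filter (fun j => pvPair cs j == k)

theorem pvPair_eq_take_drop (cs : List Char) (i : Int) (h0 : 0 ≤ i) :
    pvPair cs i = (cs.drop i.toNat).take 2 := by
  unfold pvPair
  rw [PySem.List.slice_toNat cs h0 (by omega)]
  congr 1
  omega

theorem pvPair_length (cs : List Char) (i : Int) (h0 : 0 ≤ i) (h1 : i < (cs.length : Int) - 1) :
    (pvPair cs i).length = 2 := by
  rw [pvPair_eq_take_drop cs i h0]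
  simp only [List.length_take, List.length_drop]
  omega

theorem crcLoop_eq_any (cs : List Char) (l : List Int) :
    crcLoop cs l = l.any (fun i =>
      decide (0 < (((listOccurrences cs (PySem.Chars.slice cs (some i) (some (i + 2)))).filter
        (fun o => !((listOccurrences cs (PySem.Chars.slice cs (some i) (some (i + 2)))).contains (o - 1)))).length : Int) - 1)) := by
  induction l with
  | nil => rfl
  | cons i rest ih =>
    simp only [crcLoop, List.any_cons, ih]
    by_cases h : decide (0 < (((listOccurrences cs (PySem.Chars.slice cs (some i) (some (i + 2)))).filter
        (fun o => !((listOccurrences cs (PySem.Chars.slice cs (some i) (some (i + 2)))).contains (o - 1)))).length : Int) - 1) = true <;>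
      simp_all

-- A's listOccurrences at the pair starting at a valid index i is exactly the group of that pair
theorem occ_eq_group (cs : List Char) (i : Int) (h0 : 0 ≤ i) (h1 : i < (cs.length : Int) - 1) :
    listOccurrences cs (pvPair cs i) = pvGroup cs (pvPair cs i) := by
  have hklen : (pvPair cs i).length = 2 := pvPair_length cs i h0 h1
  have hinfix : pvPair cs i <:+: cs := by
    rw [pvPair_eq_take_drop cs i h0]
    exact ((cs.drop i.toNat).take_prefix 2).isInfix.trans (cs.drop_suffix i.toNat).isInfix
  simp only [listOccurrences]
  rw [if_pos ((PySem.Chars.isIn_iff_infix _ _).mpr hinfix)]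
  rw [PySem.List.foldl_append_if_eq_filter]
  simp only [List.nil_append]
  -- pointwise: for j ∈ range(0, len), startswith (cs[j:]) k = (pvPair cs j == k)
  rw [List.filter_congr (q := fun j => pvPair cs j == pvPair cs i)
    (by
      intro j hj
      rw [PySem.List.mem_pyRange_one] at hj
      obtain ⟨hj0, hjn⟩ := hj
      simp only [PySem.Chars.slice_eq_listSlice]
      rw [PySem.List.slice_from cs hj0]
      rw [Bool.eq_iff_iff, PySem.Chars.startswith_iff, beq_iff_eq]
      rw [List.prefix_iff_eq_take, hklen, pvPair_eq_take_drop cs j hj0]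
      exact ⟨fun h => h.symm, fun h => h.symm⟩)]
  -- drop the last index n-1, whose pair is too short
  unfold pvGroup
  rcases Nat.eq_zero_or_pos cs.length with hn | hn
  · simp [hn] at h1; omega
  · have hsplit : PySem.List.pyRange 0 (cs.length : Int) 1 =
        PySem.List.pyRange 0 ((cs.length : Int) - 1) 1 ++ [(cs.length : Int) - 1] := by
      have := PySem.List.pyRange_one_succ_right (a := 0) (b := (cs.length : Int) - 1) (by omega)
      simpa [sub_add_cancel] using this
    rw [hsplit, List.filter_append]
    have hlast : (pvPair cs ((cs.length : Int) - 1) == pvPair cs i) = false := by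
      rw [beq_eq_false_iff_ne]
      intro h
      have : (pvPair cs ((cs.length : Int) - 1)).length = 2 := by rw [h, hklen]
      rw [pvPair_eq_take_drop cs _ (by omega)] at this
      simp only [List.length_take, List.length_drop] at this
      omega
    simp [hlast]

-- B's dict values are the groups of the pairs, in order of first occurrence
theorem alt_eq_any_group (s : String) :
    containsRepeatingCouple_alt s =
      (PySem.Set.ofList ((PySem.List.pyRange 0 ((s.toList.length : Int) - 1) 1).map (pvPair s.toList))).any
        (fun k =>
          decide (1 < (((pvGroup s.toList k).filter
            (fun p => !((pvGroup s.toList k).contains (p - 1)))).length : Int))) := by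
  unfold containsRepeatingCouple_alt
  simp only [PySem.Chars.slice_eq_listSlice]
  set cs := s.toList with hcs
  simp only [show ∀ i : Int, PySem.List.slice cs (some i) (some (i + 2)) = pvPair cs i from
    fun _ => rfl]
  set rng := PySem.List.pyRange 0 ((cs.length : Int) - 1) 1 with hrng
  -- the build loop, as a fold over (key, value) pairs
  have hfold : rng.foldl
      (fun d i => d.modify (pvPair cs i) [] (fun ps => ps ++ [i])) PySem.Dict.empty
      = (rng.map (fun i => (pvPair cs i, i))).foldl
          (fun d p => d.modify p.1 [] (fun ps => ps ++ [p.2])) PySem.Dict.empty := by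
    rw [List.foldl_map]
  set d := rng.foldl
      (fun d i => d.modify (pvPair cs i) [] (fun ps => ps ++ [i])) PySem.Dict.empty with hd
  have hnodup : d.keys.Nodup := by
    rw [hd]
    exact PySem.Dict.nodup_keys_foldl_modify_key rng (fun i => pvPair cs i) []
      (fun d i => fun ps => ps ++ [i]) PySem.Dict.empty (by simp [PySem.Dict.keys_empty])
  have hkeys : d.keys = PySem.Set.ofList (rng.map (pvPair cs)) := by
    rw [hd]
    rw [PySem.Dict.keys_foldl_modify_key]
    simp [PySem.Dict.keys_empty]
    rfl
  have hgetD : ∀ k, d.getD k [] = pvGroup cs k := by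
    intro k
    rw [show d = _ from hfold, PySem.Dict.getD_foldl_modify_append]
    rw [List.filter_map, List.map_map]
    simp only [PySem.Dict.getD_empty, List.nil_append]
    unfold pvGroup
    rw [← hrng]
    simp [Function.comp_def]
  rw [PySem.Dict.values_eq_map_keys d hnodup []]
  rw [List.any_map, hkeys]
  apply PySem.List.any_congr_mem
  intro k hk
  simp only [Function.comp_apply, hgetD k]
theorem set_ofList_any (l : List (List Char)) (p : List Char → Bool) :
    (PySem.Set.ofList l).any p = l.any p := by
  rw [Bool.eq_iff_iff]
  simp only [List.any_eq_true]
  constructor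
  · rintro ⟨x, hx, hp⟩; exact ⟨x, (PySem.Set.mem_ofList _ _).mp hx, hp⟩
  · rintro ⟨x, hx, hp⟩; exact ⟨x, (PySem.Set.mem_ofList _ _).mpr hx, hp⟩

-- ===== VERDICT (by name: the statement is the Claim_ definition above) =====
theorem containsRepeatingCouple_spec : Claim_equal_containsRepeatingCouple := by
  intro s _
  unfold Spec_containsRepeatingCouple
  unfold containsRepeatingCouple
  rw [crcLoop_eq_any, alt_eq_any_group, set_ofList_any, List.any_map]
  apply PySem.List.any_congr_mem
  intro i hi
  rw [PySem.List.mem_pyRange_one] at hi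
  simp only [Function.comp_apply, PySem.Chars.slice_eq_listSlice]
  simp only [show PySem.List.slice s.toList (some i) (some (i + 2)) = pvPair s.toList i from rfl,
    occ_eq_group s.toList i hi.1 hi.2]
  rw [decide_eq_decide]
  omega
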